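-- pv_equiv track=rewrite | github.com/localgaji/baekjoon | 프로그래머스/2/388352. 비밀 코드 해독/비밀 코드 해독.py | solution
-- ===== SOURCE A (Python) =====
-- def match_count(numbers: list, set_numbers: set):
--     count = 0
--     for e in numbers:
--         if e in set_numbers:
--             count += 1
--     return count
--
-- def generate_combinations(max_num):
--     combins: list[set[int]] = []
--
--     def dfs(com, start):
--         if len(com) == 5:
--             combins.append(set(com))
--             return
--         for num in range(start, max_num + 1):
--             com.append(num)
--             dfs(com, num + 1)
--             com.pop()
--
--     dfs([], 1)
--
--     return combins
--
-- def solution(max_num, questions, ans):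
--     M = len(questions)
--     combins = generate_combinations(max_num)
--
--     C = len(combins)
--     survive = [1] * C
--
--     for m in range(M):
--         quest, answer = questions[m], ans[m]
--         for c in range(C):
--             if not survive[c]:
--                 continue
--             match = match_count(quest, combins[c])
--             if match != answer:
--                 survive[c] = 0
--
--     return survive.count(1)
-- ===== SOURCE B (Python) =====
-- def solution(max_num, questions, ans):
--     def combos(lo, k):
--         if k == 0:
--             return [[]]
--         result = []
--         for n in range(lo, max_num + 1):
--             for rest in combos(n + 1, k - 1):
--                 result.append([n] + rest)
--         return result
--
--     constraints = list(zip(questions, ans))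
--     cnt = 0
--     for combo in combos(1, 5):
--         s = set(combo)
--         if all(sum(1 for e in q if e in s) == a for q, a in constraints):
--             cnt += 1
--     return cnt
-- ===== Notes on version B (the rewrite author's own statement) =====
-- stated objective: alternative
-- what changed: Replaces the DFS with a shared mutable path plus a persistent survive[] array eliminated over M index passes by a cons-building recursive combination generator and a single short-circuiting pass that counts combos satisfying all zipped (question, answer) constraints.
import Mathlib
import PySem

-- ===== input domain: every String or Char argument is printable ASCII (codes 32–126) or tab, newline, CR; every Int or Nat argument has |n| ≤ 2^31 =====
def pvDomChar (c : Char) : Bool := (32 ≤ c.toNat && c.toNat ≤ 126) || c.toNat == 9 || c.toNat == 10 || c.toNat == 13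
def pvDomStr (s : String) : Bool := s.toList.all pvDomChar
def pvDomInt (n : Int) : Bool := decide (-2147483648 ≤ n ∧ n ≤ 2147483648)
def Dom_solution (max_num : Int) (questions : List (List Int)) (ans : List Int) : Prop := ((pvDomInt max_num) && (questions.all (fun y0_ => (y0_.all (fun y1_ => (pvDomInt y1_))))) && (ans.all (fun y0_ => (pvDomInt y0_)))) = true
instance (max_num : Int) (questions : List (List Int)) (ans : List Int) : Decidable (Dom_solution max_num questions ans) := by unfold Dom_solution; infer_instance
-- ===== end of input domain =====

-- B replaces A's DFS-with-shared-path + persistent survive[] multi-pass elimination by a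
-- cons-building combination generator and one counting pass over zipped constraints (objective: alternative).

-- ===== PORT A =====
def match_count (numbers : List Int) (set_numbers : PySem.Set Int) : Int :=
  numbers.foldl (fun count e => if PySem.Set.contains set_numbers e then count + 1 else count) 0

-- A's dfs: recursion depth is bounded by 5 - len(com); the fuel argument makes that structural.
def dfsA (max_num : Int) (fuel : Nat) (com : List Int) (start : Int) : List (PySem.Set Int) :=
  if com.length == 5 then [PySem.Set.ofList com]
  else
    match fuel with
    | 0 => []   -- unreachable when fuel = 5 - len(com) (totality guard only)
    | f + 1 =>
      (PySem.List.pyRange start (max_num + 1) 1).foldl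
        (fun acc num => acc ++ dfsA max_num f (com ++ [num]) (num + 1)) []

def generate_combinations (max_num : Int) : List (PySem.Set Int) :=
  dfsA max_num 5 [] 1

def solution (max_num : Int) (questions : List (List Int)) (ans : List Int) : Int :=
  let M : Int := questions.length
  let combins := generate_combinations max_num
  let C : Int := combins.length
  let survive : List Int := List.replicate combins.length 1
  let survive :=
    (PySem.List.pyRange 0 M 1).foldl (fun survive m =>
      let quest := PySem.List.pyGetD questions m []
      let answer := PySem.List.pyGetD ans m 0
      (PySem.List.pyRange 0 C 1).foldl (fun sv c =>
        if PySem.List.pyGetD sv c 0 == 0 then sv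
        else
          let mtch := match_count quest (PySem.List.pyGetD combins c [])
          if mtch ≠ answer then PySem.List.pySetD sv c 0 else sv) survive) survive
  (PySem.List.count survive 1 : Int)

-- ===== PORT B =====
def combosB (max_num : Int) (lo : Int) : Nat → List (List Int)
  | 0 => [[]]
  | k + 1 =>
    (PySem.List.pyRange lo (max_num + 1) 1).foldl
      (fun result n => result ++ (combosB max_num (n + 1) k).map (fun rest => n :: rest)) []

def solution_alt (max_num : Int) (questions : List (List Int)) (ans : List Int) : Int :=
  let constraints := questions.zip ans
  (combosB max_num 1 5).foldl (fun cnt combo =>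
    let s := PySem.Set.ofList combo
    if constraints.all (fun qa =>
        qa.1.foldl (fun t e => if PySem.Set.contains s e then t + 1 else t) 0 == qa.2)
    then cnt + 1 else cnt) 0

-- ===== PRECONDITION & SPEC =====
-- Pre_ excludes exactly the inputs where A raises IndexError: ans shorter than questions.
def Pre_solution (max_num : Int) (questions : List (List Int)) (ans : List Int) : Prop :=
  questions.length ≤ ans.length
instance (max_num : Int) (questions : List (List Int)) (ans : List Int) : Decidable (Pre_solution max_num questions ans) := by unfold Pre_solution; infer_instance

def pvWitness_solution : Int × List (List Int) × List Int := (5, [[1, 2]], [2])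

def Spec_solution (max_num : Int) (questions : List (List Int)) (ans : List Int) (out : Int) : Prop := out = solution_alt max_num questions ans
instance (max_num : Int) (questions : List (List Int)) (ans : List Int) (out : Int) : Decidable (Spec_solution max_num questions ans out) := by unfold Spec_solution; infer_instance

-- ===== CLAIM (what is proved, stated in full; the proofs are below) =====
def Claim_equal_solution : Prop := ∀ (max_num : Int) (questions : List (List Int)) (ans : List Int), Dom_solution max_num questions ans → Pre_solution max_num questions ans → Spec_solution max_num questions ans (solution max_num questions ans)

-- ===== LEMMAS AND PROOFS =====

-- The two generators produce the same combinations, in the same order: A's DFS carries the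
-- growing path `com` down and appends set(com) at the leaves; B builds each list front-to-back.
theorem dfsA_eq_combosB (max_num : Int) : ∀ (fuel : Nat) (com : List Int) (start : Int),
    com.length + fuel = 5 →
    dfsA max_num fuel com start
      = (combosB max_num start fuel).map (fun t => PySem.Set.ofList (com ++ t)) := by
  intro fuel
  induction fuel with
  | zero =>
    intro com start h
    simp only [Nat.add_zero] at h
    simp [dfsA, combosB, h]
  | succ f ih =>
    intro com start h
    have hne : (com.length == 5) = false := by simp; omega
    rw [dfsA, combosB]
    simp only [hne, Bool.false_eq_true, if_false]
    rw [PySem.List.foldl_append_eq_flatMap, PySem.List.foldl_append_eq_flatMap]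
    simp only [List.nil_append, List.map_flatMap]
    apply List.flatMap_congr
    intro n _
    rw [ih (com ++ [n]) (n + 1) (by simp; omega)]
    simp [List.map_map, Function.comp_def, List.append_assoc]

-- The pointwise effect of A's inner elimination step on one survive cell.
def gElim (quest : List Int) (answer : Int) (s : Int) (comb : PySem.Set Int) : Int :=
  if s == 0 then s else if match_count quest comb ≠ answer then 0 else s

theorem set_at_prefix {α : Type} (v : α) : ∀ (P : List α) (n : Nat) (a : α) (rest : List α),
    P.length = n → (P ++ a :: rest).set n v = P ++ v :: rest := by
  intro P
  induction P with
  | nil =>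
    intro n a rest h
    simp at h
    subst h
    simp
  | cons x P ih =>
    intro n a rest h
    cases n with
    | zero => simp at h
    | succ n =>
      simp only [List.length_cons, Nat.add_right_cancel_iff] at h
      simpa using ih n a rest h

theorem getD_at_prefix {α : Type} (d : α) : ∀ (P : List α) (n : Nat) (a : α) (rest : List α),
    P.length = n → (P ++ a :: rest).getD n d = a := by
  intro P
  induction P with
  | nil =>
    intro n a rest h
    simp at h
    subst h
    simp
  | cons x P ih =>
    intro n a rest h
    cases n with
    | zero => simp at h
    | succ n =>
      simp only [List.length_cons, Nat.add_right_cancel_iff] at h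
      simpa using ih n a rest h

-- A's inner index loop over range(C) acts cellwise: it is zipWith gElim on the processed prefix.
theorem inner_fold (combins : List (PySem.Set Int)) (quest : List Int) (answer : Int) :
    ∀ (k : Nat) (sv : List Int), sv.length = combins.length → k ≤ combins.length →
    (PySem.List.pyRange 0 (k : Int) 1).foldl
      (fun sv c =>
        if PySem.List.pyGetD sv c 0 == 0 then sv
        else if match_count quest (PySem.List.pyGetD combins c []) ≠ answer then
          PySem.List.pySetD sv c 0
        else sv) sv
    = List.zipWith (gElim quest answer) (sv.take k) (combins.take k) ++ sv.drop k := by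
  intro k
  induction k with
  | zero => intro sv hlen hk; simp [PySem.List.pyRange_one_eq_nil]
  | succ k ih =>
    intro sv hlen hk
    have hkc : k < combins.length := by omega
    have hks : k < sv.length := by omega
    have hcast : ((k + 1 : Nat) : Int) = (k : Int) + 1 := by push_cast; ring
    rw [hcast, PySem.List.pyRange_one_succ_right (by positivity), List.foldl_append,
      List.foldl_cons, List.foldl_nil, ih sv hlen (by omega)]
    have hPlen : (List.zipWith (gElim quest answer) (sv.take k) (combins.take k)).length = k := by
      simp; omega
    have hdropEq : sv.drop k = sv[k] :: sv.drop (k + 1) := List.drop_eq_getElem_cons hks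
    have hget : PySem.List.pyGetD
        (List.zipWith (gElim quest answer) (sv.take k) (combins.take k) ++ sv.drop k)
        (k : Int) 0 = sv[k] := by
      rw [PySem.List.pyGetD_natCast, hdropEq]
      exact getD_at_prefix 0 _ k _ _ hPlen
    have hgetc : PySem.List.pyGetD combins (k : Int) [] = combins[k] := by
      rw [PySem.List.pyGetD_natCast]
      exact List.getD_eq_getElem combins [] hkc
    have hset : PySem.List.pySetD
        (List.zipWith (gElim quest answer) (sv.take k) (combins.take k) ++ sv.drop k)
        (k : Int) 0 = List.zipWith (gElim quest answer) (sv.take k) (combins.take k)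
          ++ (0 : Int) :: sv.drop (k + 1) := by
      rw [PySem.List.pySetD_natCast, hdropEq]
      exact set_at_prefix 0 _ k _ _ hPlen
    rw [List.take_add_one, List.take_add_one, List.getElem?_eq_getElem hks,
      List.getElem?_eq_getElem hkc]
    simp only [Option.toList_some]
    rw [List.zipWith_append (by simp; omega)]
    simp only [List.zipWith_cons_cons, List.zipWith_nil_right]
    simp only [hget, hgetc]
    rw [gElim]
    split_ifs with h0 hm
    · rw [hdropEq, List.append_assoc, List.singleton_append]
    · rw [hset, List.append_assoc, List.singleton_append]
    · rw [hdropEq, List.append_assoc, List.singleton_append]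

-- gElim on a dead cell keeps it dead; on a live cell it is the indicator of the constraints.
theorem foldl_gElim_zero (c : PySem.Set Int) :
    ∀ (L : List (List Int × Int)), L.foldl (fun s qa => gElim qa.1 qa.2 s c) 0 = 0 := by
  intro L
  induction L with
  | nil => rfl
  | cons qa L ih => simpa [gElim] using ih

theorem foldl_gElim_one (c : PySem.Set Int) :
    ∀ (L : List (List Int × Int)),
    L.foldl (fun s qa => gElim qa.1 qa.2 s c) 1
      = if L.all (fun qa => match_count qa.1 c == qa.2) then (1 : Int) else 0 := by
  intro L
  induction L with
  | nil => rfl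
  | cons qa L ih =>
    rw [List.foldl_cons, List.all_cons]
    by_cases hm : match_count qa.1 c = qa.2
    · have hb : (match_count qa.1 c == qa.2) = true := by simp [hm]
      have hg : gElim qa.1 qa.2 1 c = 1 := by simp [gElim, hm]
      rw [hb, Bool.true_and, hg, ih]
    · have hb : (match_count qa.1 c == qa.2) = false := by simp [hm]
      have hg : gElim qa.1 qa.2 1 c = 0 := by simp [gElim, hm]
      rw [hb, Bool.false_and, hg, foldl_gElim_zero]
      simp

theorem zipWith_map_self (g : Int → PySem.Set Int → Int) (f : PySem.Set Int → Int) :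
    ∀ (l : List (PySem.Set Int)), List.zipWith g (l.map f) l = l.map (fun c => g (f c) c) := by
  intro l
  induction l with
  | nil => rfl
  | cons x l ih => simp [ih]

-- The whole elimination phase commutes with map: it acts pointwise on each combination.
theorem outer_fold (combins : List (PySem.Set Int)) :
    ∀ (L : List (List Int × Int)) (f : PySem.Set Int → Int),
    L.foldl (fun sv qa =>
        (PySem.List.pyRange 0 (combins.length : Int) 1).foldl
          (fun sv c =>
            if PySem.List.pyGetD sv c 0 == 0 then sv
            else if match_count qa.1 (PySem.List.pyGetD combins c []) ≠ qa.2 then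
              PySem.List.pySetD sv c 0
            else sv) sv)
      (combins.map f)
    = combins.map (fun c => L.foldl (fun s qa => gElim qa.1 qa.2 s c) (f c)) := by
  intro L
  induction L with
  | nil => intro f; simp
  | cons qa L ih =>
    intro f
    rw [List.foldl_cons,
      inner_fold combins qa.1 qa.2 combins.length (combins.map f) (by simp) le_rfl,
      List.take_of_length_le (by simp : (combins.map f).length ≤ combins.length),
      List.drop_eq_nil_of_le (by simp : (combins.map f).length ≤ combins.length),
      List.take_length, List.append_nil, zipWith_map_self, ih (fun c => gElim qa.1 qa.2 (f c) c)]
    simp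

-- Index loop over range(len(questions)) reading questions[m], ans[m] = fold over the zip.
theorem foldl_range_zip {σ : Type} :
    ∀ (qs : List (List Int)) (an : List Int) (F : σ → List Int → Int → σ) (init : σ),
    qs.length ≤ an.length →
    (List.range qs.length).foldl (fun st k => F st (qs.getD k []) (an.getD k 0)) init
      = (qs.zip an).foldl (fun st qa => F st qa.1 qa.2) init := by
  intro qs
  induction qs with
  | nil => intro an F init _; simp
  | cons q qs ih =>
    intro an F init h
    cases an with
    | nil => simp at h
    | cons a an =>
      rw [List.length_cons, List.range_succ_eq_map, List.foldl_cons, List.foldl_map]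
      simp only [List.getD_cons_zero, List.getD_cons_succ, List.zip_cons_cons, List.foldl_cons]
      exact ih an F (F init q a) (by simpa using h)

theorem foldl_idx_zip {σ : Type} (qs : List (List Int)) (an : List Int)
    (F : σ → List Int → Int → σ) (init : σ) (h : qs.length ≤ an.length) :
    (PySem.List.pyRange 0 (qs.length : Int) 1).foldl
      (fun st m => F st (PySem.List.pyGetD qs m []) (PySem.List.pyGetD an m 0)) init
      = (qs.zip an).foldl (fun st qa => F st qa.1 qa.2) init := by
  rw [PySem.List.pyRange_one]
  simp only [Int.sub_zero, Int.toNat_natCast, List.foldl_map, zero_add,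
    PySem.List.pyGetD_natCast]
  exact foldl_range_zip qs an F init h

theorem count_one_map_indicator {α : Type} (Q : α → Bool) :
    ∀ (l : List α),
    (l.map (fun c => if Q c then (1 : Int) else 0)).count 1 = l.countP Q := by
  intro l
  induction l with
  | nil => rfl
  | cons x l ih => by_cases h : Q x <;> simp [h, ih]

-- A, under Pre_, computes the count of combinations passing every zipped constraint.
theorem solution_eq (mx : Int) (qs : List (List Int)) (an : List Int)
    (hpre : qs.length ≤ an.length) :
    solution mx qs an
      = ((combosB mx 1 5).countP (fun combo =>
          (qs.zip an).all (fun qa => match_count qa.1 (PySem.Set.ofList combo) == qa.2)) : Int) := by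
  have hgen : generate_combinations mx = (combosB mx 1 5).map PySem.Set.ofList := by
    rw [generate_combinations, dfsA_eq_combosB mx 5 [] 1 (by simp)]
    simp
  simp only [solution, hgen]
  rw [foldl_idx_zip qs an (fun st q a =>
      (PySem.List.pyRange 0 (((combosB mx 1 5).map PySem.Set.ofList).length : Int) 1).foldl
        (fun sv c =>
          if PySem.List.pyGetD sv c 0 == 0 then sv
          else if match_count q
              (PySem.List.pyGetD ((combosB mx 1 5).map PySem.Set.ofList) c []) ≠ a then
            PySem.List.pySetD sv c 0
          else sv) st)
    (List.replicate ((combosB mx 1 5).map PySem.Set.ofList).length 1) hpre]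
  rw [show List.replicate ((combosB mx 1 5).map PySem.Set.ofList).length (1 : Int)
      = ((combosB mx 1 5).map PySem.Set.ofList).map (fun _ => (1 : Int)) from
    (List.map_const').symm]
  rw [outer_fold ((combosB mx 1 5).map PySem.Set.ofList) (qs.zip an) (fun _ => (1 : Int))]
  simp only [foldl_gElim_one, List.map_map, Function.comp_def]
  rw [PySem.List.count_eq, count_one_map_indicator
    (fun t => (qs.zip an).all (fun qa => match_count qa.1 (PySem.Set.ofList t) == qa.2))]

theorem solution_alt_eq (mx : Int) (qs : List (List Int)) (an : List Int) :
    solution_alt mx qs an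
      = ((combosB mx 1 5).countP (fun combo =>
          (qs.zip an).all (fun qa => match_count qa.1 (PySem.Set.ofList combo) == qa.2)) : Int) := by
  unfold solution_alt
  rw [PySem.List.foldl_if_add_one]
  simp only [zero_add]
  congr 1

-- ===== VERDICT (by name: the statement is the Claim_ definition above) =====
theorem solution_spec : Claim_equal_solution := by
  intro mx qs an _ hpre
  unfold Spec_solution
  rw [solution_eq mx qs an hpre, solution_alt_eq]
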